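-- pv_equiv track=rewrite | github.com/itrummer/dbz | src/dbz/generate/debug.py | _group_checks
-- ===== SOURCE A (Python) =====
-- def _group_checks(checks, passes):
--     """ Divides checks into groups that passed/failed for all compositions.
--
--     Args:
--         checks: list of checks
--         passes: per-composition passes
--
--     Returns:
--         one group of checks that passed, groups of checks that failed
--     """
--     nr_checks = len(checks)
--     all_passes = [True] * nr_checks
--     no_passes = [True] * nr_checks
--     for comp_passes in passes:
--         for check_idx, passed in enumerate(comp_passes):
--             all_passes[check_idx] &= passed
--             no_passes[check_idx] &= not passed
--
--     failed_groups = [checks]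
--     passed_groups = []
--     for check, all_pass, no_pass in zip(
--         checks, all_passes, no_passes):
--         if all_pass:
--             passed_groups += [check]
--         if no_pass:
--             failed_groups += [[check]]
--
--     return passed_groups, failed_groups
-- ===== SOURCE B (Python) =====
-- def _group_checks(checks, passes):
--     """Divides checks into groups that passed/failed for all compositions."""
--     passed_groups = []
--     failed_groups = [checks]
--     for idx, check in enumerate(checks):
--         votes = [comp[idx] for comp in passes if idx < len(comp)]
--         if all(votes):
--             passed_groups.append(check)
--         if not any(votes):
--             failed_groups.append([check])
--     return passed_groups, failed_groups
-- ===== Notes on version B (the rewrite author's own statement) =====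
-- stated objective: simpler
-- what changed: B computes each check's verdict directly per index (all/any over the compositions' votes at that index) in a single loop over checks, instead of A's pre-pass sweeping two accumulator arrays over all compositions and a second zip loop.
import Mathlib
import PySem

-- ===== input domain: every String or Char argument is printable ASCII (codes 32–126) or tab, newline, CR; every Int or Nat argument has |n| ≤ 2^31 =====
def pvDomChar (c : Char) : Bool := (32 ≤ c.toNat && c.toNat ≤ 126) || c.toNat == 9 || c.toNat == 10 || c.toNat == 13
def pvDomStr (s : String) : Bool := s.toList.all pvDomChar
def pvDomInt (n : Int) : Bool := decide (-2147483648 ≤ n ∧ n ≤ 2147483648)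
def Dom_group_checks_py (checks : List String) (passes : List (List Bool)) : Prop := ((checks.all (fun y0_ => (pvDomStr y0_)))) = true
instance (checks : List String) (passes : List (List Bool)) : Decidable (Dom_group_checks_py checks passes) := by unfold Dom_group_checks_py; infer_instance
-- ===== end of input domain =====

-- B computes each check's verdict directly per index in one loop over checks (simpler decomposition);
-- A sweeps two accumulator arrays over all compositions first and then zips.

-- ===== PORT A =====
-- inner accumulator update: all_passes[check_idx] &= passed; no_passes[check_idx] &= not passed
def pvStepA (st : List Bool × List Bool) (pi : Bool × Nat) : List Bool × List Bool :=
  (st.1.set pi.2 (getElem! st.1 pi.2 && pi.1), st.2.set pi.2 (getElem! st.2 pi.2 && !pi.1))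

-- one composition: for check_idx, passed in enumerate(comp_passes): …
def pvInnerA (st : List Bool × List Bool) (comp : List Bool) : List Bool × List Bool :=
  comp.zipIdx.foldl pvStepA st

-- the first loop of A: the final (all_passes, no_passes) accumulator pair
def pvAccsA (checks : List String) (passes : List (List Bool)) : List Bool × List Bool :=
  passes.foldl pvInnerA (List.replicate checks.length true, List.replicate checks.length true)

-- body of A's second loop over zip(checks, all_passes, no_passes)
def pvOutStepA (acc : List String × List (List String)) (t : String × (Bool × Bool)) :
    List String × List (List String) :=
  let acc := if t.2.1 then (acc.1 ++ [t.1], acc.2) else acc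
  if t.2.2 then (acc.1, acc.2 ++ [[t.1]]) else acc

def group_checks_py (checks : List String) (passes : List (List Bool)) :
    List String × List (List String) :=
  (checks.zip ((pvAccsA checks passes).1.zip (pvAccsA checks passes).2)).foldl
    pvOutStepA ([], [checks])

-- ===== PORT B =====
-- body of B's single loop: votes = [comp[idx] for comp in passes if idx < len(comp)]
def pvStepB (passes : List (List Bool)) (acc : List String × List (List String))
    (ci : String × Nat) : List String × List (List String) :=
  let votes := passes.filterMap (fun comp => getElem? comp ci.2)
  (if votes.all id then acc.1 ++ [ci.1] else acc.1,
   if !votes.any id then acc.2 ++ [[ci.1]] else acc.2)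

def group_checks_py_alt (checks : List String) (passes : List (List Bool)) :
    List String × List (List String) :=
  checks.zipIdx.foldl (pvStepB passes) ([], [checks])

-- ===== PRECONDITION & SPEC =====
-- Pre_ excludes exactly the inputs where A raises IndexError: a composition with more votes than checks.
def Pre_group_checks_py (checks : List String) (passes : List (List Bool)) : Prop :=
  ∀ comp ∈ passes, comp.length ≤ checks.length
instance (checks : List String) (passes : List (List Bool)) :
    Decidable (Pre_group_checks_py checks passes) := by unfold Pre_group_checks_py; infer_instance

def pvWitness_group_checks_py : List String × List (List Bool) :=
  (["a", "b"], [[true, false], [true]])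

def Spec_group_checks_py (checks : List String) (passes : List (List Bool))
    (out : List String × List (List String)) : Prop := out = group_checks_py_alt checks passes
instance (checks : List String) (passes : List (List Bool)) (out : List String × List (List String)) :
    Decidable (Spec_group_checks_py checks passes out) := by unfold Spec_group_checks_py; infer_instance

-- ===== CLAIM (what is proved, stated in full; the proofs are below) =====
def Claim_equal_group_checks_py : Prop := ∀ (checks : List String) (passes : List (List Bool)), Dom_group_checks_py checks passes → Pre_group_checks_py checks passes → Spec_group_checks_py checks passes (group_checks_py checks passes)


-- ===== LEMMAS AND PROOFS =====

-- elementwise combination with the votes of one composition (missing vote = no change)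
def pvUpd (f : Bool → Bool → Bool) : List Bool → List Bool → List Bool
  | a, [] => a
  | [], _ => []
  | x :: a, v :: vs => f x v :: pvUpd f a vs

theorem pvUpd_length (f : Bool → Bool → Bool) (a vs : List Bool) :
    (pvUpd f a vs).length = a.length := by
  induction a generalizing vs with
  | nil => cases vs <;> simp [pvUpd]
  | cons x a ih => cases vs <;> simp [pvUpd, ih]

theorem pvUpd_getElem? (f : Bool → Bool → Bool) (a vs : List Bool) (i : Nat) :
    getElem? (pvUpd f a vs) i =
      (getElem? a i).map (fun x => match getElem? vs i with | some v => f x v | none => x) := by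
  induction a generalizing vs i with
  | nil => cases vs <;> simp [pvUpd]
  | cons x a ih =>
    cases vs with
    | nil => simp [pvUpd]
    | cons v vs => cases i <;> simp [pvUpd, ih]

theorem pvInnerA_shift (comp : List Bool) (p q a n : List Bool)
    (hpq : q.length = p.length) (ha : comp.length ≤ a.length) (hn : comp.length ≤ n.length) :
    (comp.zipIdx p.length).foldl pvStepA (p ++ a, q ++ n) =
      (p ++ pvUpd (fun x v => x && v) a comp, q ++ pvUpd (fun x v => x && !v) n comp) := by
  induction comp generalizing p q a n with
  | nil => simp [pvUpd]
  | cons v vs ih =>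
    cases a with
    | nil => simp at ha
    | cons x a' =>
      cases n with
      | nil => simp at hn
      | cons y n' =>
        rw [List.zipIdx_cons, List.foldl_cons]
        have hstep : pvStepA (p ++ x :: a', q ++ y :: n') (v, p.length) =
            (p ++ (x && v) :: a', q ++ (y && !v) :: n') := by
          simp [pvStepA, List.getElem!_eq_getElem?_getD, hpq, List.set_append_right]
        rw [hstep]
        have h1 : p ++ (x && v) :: a' = (p ++ [x && v]) ++ a' := by simp
        have h2 : q ++ (y && !v) :: n' = (q ++ [y && !v]) ++ n' := by simp
        have hlen : p.length + 1 = (p ++ [x && v]).length := by simp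
        rw [h1, h2, hlen, ih (p ++ [x && v]) (q ++ [y && !v]) a' n' (by simp [hpq])
          (by simpa using ha) (by simpa using hn)]
        simp [pvUpd]

theorem pvInnerA_eq (comp : List Bool) (a n : List Bool)
    (ha : comp.length ≤ a.length) (hn : comp.length ≤ n.length) :
    pvInnerA (a, n) comp =
      (pvUpd (fun x v => x && v) a comp, pvUpd (fun x v => x && !v) n comp) := by
  have h := pvInnerA_shift comp [] [] a n rfl ha hn
  simpa [pvInnerA] using h

theorem pvOuter_eq (ps : List (List Bool)) (a n : List Bool)
    (ha : ∀ comp ∈ ps, comp.length ≤ a.length) (hn : ∀ comp ∈ ps, comp.length ≤ n.length) :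
    ps.foldl pvInnerA (a, n) =
      (ps.foldl (pvUpd (fun x v => x && v)) a, ps.foldl (pvUpd (fun x v => x && !v)) n) := by
  induction ps generalizing a n with
  | nil => rfl
  | cons comp ps ih =>
    rw [List.foldl_cons, List.foldl_cons, List.foldl_cons,
      pvInnerA_eq comp a n (ha comp (by simp)) (hn comp (by simp))]
    exact ih _ _ (fun d hd => (pvUpd_length _ _ _).symm ▸ ha d (by simp [hd]))
      (fun d hd => (pvUpd_length _ _ _).symm ▸ hn d (by simp [hd]))

theorem pvFoldUpd_getElem? (f : Bool → Bool → Bool) (ps : List (List Bool)) (a : List Bool)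
    (i : Nat) (x : Bool) (hx : getElem? a i = some x) :
    getElem? (ps.foldl (pvUpd f) a) i =
      some (ps.foldl (fun b row => match getElem? row i with | some v => f b v | none => b) x) := by
  induction ps generalizing a x with
  | nil => simpa using hx
  | cons row ps ih =>
    rw [List.foldl_cons, List.foldl_cons]
    exact ih (pvUpd f a row) _ (by rw [pvUpd_getElem?, hx]; rfl)

theorem pvFold_all (ps : List (List Bool)) (i : Nat) (b : Bool) :
    (ps.foldl (fun x row => match getElem? row i with | some v => x && v | none => x) b) =
      (b && (ps.filterMap (fun row => getElem? row i)).all id) := by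
  induction ps generalizing b with
  | nil => simp
  | cons row ps ih =>
    rw [List.foldl_cons]
    cases h : getElem? row i with
    | none => simp [h, ih]
    | some v => simp [h, ih, Bool.and_assoc]

theorem pvFold_no (ps : List (List Bool)) (i : Nat) (b : Bool) :
    (ps.foldl (fun x row => match getElem? row i with | some v => x && !v | none => x) b) =
      (b && !(ps.filterMap (fun row => getElem? row i)).any id) := by
  induction ps generalizing b with
  | nil => simp
  | cons row ps ih =>
    rw [List.foldl_cons]
    cases h : getElem? row i with
    | none => simp [h, ih]
    | some v => simp [h, ih, Bool.and_assoc]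

theorem pvStep_agree (passes : List (List Bool)) (acc : List String × List (List String))
    (s : String) (i : Nat) :
    pvOutStepA acc (s, ((passes.filterMap (fun d => getElem? d i)).all id,
        !(passes.filterMap (fun d => getElem? d i)).any id)) = pvStepB passes acc (s, i) := by
  simp only [pvOutStepA, pvStepB]
  split_ifs <;> simp_all

-- ===== VERDICT (by name: the statement is the Claim_ definition above) =====
theorem group_checks_py_spec : Claim_equal_group_checks_py := by
  intro checks passes _ hpre
  unfold Spec_group_checks_py group_checks_py group_checks_py_alt pvAccsA
  rw [pvOuter_eq passes _ _ (fun comp hc => by simpa using hpre comp hc)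
    (fun comp hc => by simpa using hpre comp hc)]
  have hzip : checks.zip
      ((passes.foldl (pvUpd (fun x v => x && v)) (List.replicate checks.length true)).zip
        (passes.foldl (pvUpd (fun x v => x && !v)) (List.replicate checks.length true))) =
      checks.zipIdx.map (fun ci => (ci.1,
        ((passes.filterMap (fun d => getElem? d ci.2)).all id,
         !(passes.filterMap (fun d => getElem? d ci.2)).any id))) := by
    apply List.ext_getElem?
    intro i
    by_cases h : i < checks.length
    · obtain ⟨x, hx⟩ : ∃ x, getElem? checks i = some x :=
        ⟨checks.get ⟨i, h⟩, by simp⟩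
      have hA := pvFoldUpd_getElem? (fun x v => x && v) passes
        (List.replicate checks.length true) i true (by simp [h])
      have hN := pvFoldUpd_getElem? (fun x v => x && !v) passes
        (List.replicate checks.length true) i true (by simp [h])
      simp only at hA hN
      rw [pvFold_all] at hA
      rw [pvFold_no] at hN
      simp only [Bool.true_and] at hA hN
      rw [List.zip_eq_zipWith, List.getElem?_zipWith, List.zip_eq_zipWith,
        List.getElem?_zipWith, hA, hN, hx]
      simp [List.getElem?_zipIdx, hx]
    · have h1 : getElem? checks i = none := by
        rw [List.getElem?_eq_none_iff]; omega
      rw [List.zip_eq_zipWith, List.getElem?_zipWith, h1]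
      have h2 : getElem? (checks.zipIdx.map (fun ci => (ci.1,
          ((passes.filterMap (fun d => getElem? d ci.2)).all id,
           !(passes.filterMap (fun d => getElem? d ci.2)).any id)))) i = none := by
        rw [List.getElem?_eq_none_iff]; simp; omega
      rw [h2]
  rw [hzip]
  simp only [List.foldl_map]
  have hfun : (fun (acc : List String × List (List String)) (ci : String × Nat) =>
      pvOutStepA acc (ci.1,
        ((passes.filterMap (fun d => getElem? d ci.2)).all id,
         !(passes.filterMap (fun d => getElem? d ci.2)).any id))) = pvStepB passes := by
    funext acc ci
    exact pvStep_agree passes acc ci.1 ci.2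
  rw [hfun]
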